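-- pv_equiv track=rewrite | github.com/AIlhomov/Kattis | hiptobesquare.py | max_layers
-- ===== SOURCE A (Python) =====
-- def max_layers(n):
--     left, right = 0, int(1e5)
--     while left < right:
--         mid = (left + right + 1) // 2
--         tiles = 4 * mid * (mid + 1)
--         if tiles <= n:
--             left = mid
--         else:
--             right = mid - 1
--     return left
-- ===== SOURCE B (Python) =====
-- def max_layers(n):
--     m = 0
--     while m < 100000 and 4 * (m + 1) * (m + 2) <= n:
--         m += 1
--     return m
-- ===== Notes on version B (the rewrite author's own statement) =====
-- stated objective: simpler
-- what changed: Replaced the capped binary search over [0,100000] with a linear incremental scan that adds layers while the next layer still fits.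
import Mathlib
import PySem

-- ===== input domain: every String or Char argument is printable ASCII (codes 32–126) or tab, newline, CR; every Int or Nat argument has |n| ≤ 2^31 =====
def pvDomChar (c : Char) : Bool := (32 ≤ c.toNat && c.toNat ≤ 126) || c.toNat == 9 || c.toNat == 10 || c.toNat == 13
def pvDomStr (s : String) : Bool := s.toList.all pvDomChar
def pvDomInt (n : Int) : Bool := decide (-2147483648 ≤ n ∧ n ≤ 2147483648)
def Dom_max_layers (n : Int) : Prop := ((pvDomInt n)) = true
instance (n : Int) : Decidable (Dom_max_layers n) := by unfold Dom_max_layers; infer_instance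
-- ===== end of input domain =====

-- B replaces A's capped binary search with a linear layer-by-layer scan; objective: simpler.

-- ===== PORT A =====
-- the while-loop of A over state (left, right)
def maxLayersLoop (n left right : Int) : Int :=
  if h : left < right then
    let mid := PySem.Int.floordiv (left + right + 1) 2
    let tiles := 4 * mid * (mid + 1)
    if tiles ≤ n then maxLayersLoop n mid right
    else maxLayersLoop n left (mid - 1)
  else left
termination_by (right - left).toNat
decreasing_by
  · have h1 : left + 1 ≤ PySem.Int.floordiv (left + right + 1) 2 :=
      (PySem.Int.le_floordiv_iff_mul_le (by omega)).mpr (by omega)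
    omega
  · have h2 : PySem.Int.floordiv (left + right + 1) 2 < right + 1 :=
      (PySem.Int.floordiv_lt_iff_lt_mul (by omega)).mpr (by omega)
    omega

def max_layers (n : Int) : Int := maxLayersLoop n 0 100000

-- ===== PORT B =====
-- the while-loop of B over state m
def altLoop (n m : Int) : Int :=
  if h : m < 100000 ∧ 4 * (m + 1) * (m + 2) ≤ n then altLoop n (m + 1) else m
termination_by (100000 - m).toNat
decreasing_by omega

def max_layers_alt (n : Int) : Int := altLoop n 0

-- ===== PRECONDITION & SPEC =====
def Spec_max_layers (n : Int) (out : Int) : Prop := out = max_layers_alt n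
instance (n : Int) (out : Int) : Decidable (Spec_max_layers n out) := by unfold Spec_max_layers; infer_instance

-- ===== CLAIM (what is proved, stated in full; the proofs are below) =====
def Claim_equal_max_layers : Prop := ∀ (n : Int), Dom_max_layers n → Spec_max_layers n (max_layers n)

-- ===== LEMMAS AND PROOFS =====

-- both loops return the unique m with 0 ≤ m ≤ 100000, m fits (or m = 0), and the next layer does not fit (or m is the cap)
def GoodLayers (n m : Int) : Prop :=
  0 ≤ m ∧ m ≤ 100000 ∧ (4 * m * (m + 1) ≤ n ∨ m = 0) ∧ (m = 100000 ∨ ¬ 4 * (m + 1) * (m + 2) ≤ n)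

theorem layers_mono {a b : Int} (ha : 0 ≤ a) (hab : a ≤ b) : 4 * a * (a + 1) ≤ 4 * b * (b + 1) := by
  nlinarith

theorem goodLayers_unique {n m1 m2 : Int} (h1 : GoodLayers n m1) (h2 : GoodLayers n m2) : m1 = m2 := by
  obtain ⟨a1, b1, c1, d1⟩ := h1
  obtain ⟨a2, b2, c2, d2⟩ := h2
  by_contra hne
  rcases lt_or_gt_of_ne hne with hlt | hgt
  · have hfit : 4 * m2 * (m2 + 1) ≤ n := by
      rcases c2 with h | h
      · exact h
      · omega
    have hnext : ¬ 4 * (m1 + 1) * (m1 + 2) ≤ n := by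
      rcases d1 with h | h
      · omega
      · exact h
    have key : 4 * (m1 + 1) * (m1 + 2) ≤ 4 * m2 * (m2 + 1) := by nlinarith
    exact hnext (le_trans key hfit)
  · have hfit : 4 * m1 * (m1 + 1) ≤ n := by
      rcases c1 with h | h
      · exact h
      · omega
    have hnext : ¬ 4 * (m2 + 1) * (m2 + 2) ≤ n := by
      rcases d2 with h | h
      · omega
      · exact h
    have key : 4 * (m2 + 1) * (m2 + 2) ≤ 4 * m1 * (m1 + 1) := by nlinarith
    exact hnext (le_trans key hfit)

theorem aLoop_good (n : Int) : ∀ left right : Int,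
    0 ≤ left → left ≤ right → right ≤ 100000 →
    (4 * left * (left + 1) ≤ n ∨ left = 0) →
    (∀ m, right < m → m ≤ 100000 → ¬ 4 * m * (m + 1) ≤ n) →
    GoodLayers n (maxLayersLoop n left right) := by
  intro left right
  induction left, right using maxLayersLoop.induct n with
  | case1 left right hlt mid tiles hle ih =>
    intro h0 hlr hr hP hB
    have hmid1 : left + 1 ≤ mid :=
      (PySem.Int.le_floordiv_iff_mul_le (by omega)).mpr (by omega)
    have hmid2 : mid < right + 1 :=
      (PySem.Int.floordiv_lt_iff_lt_mul (by omega)).mpr (by omega)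
    rw [maxLayersLoop]
    simp only [hlt, dite_true]
    rw [if_pos hle]
    exact ih (by omega) (by omega) hr (Or.inl hle) hB
  | case2 left right hlt mid tiles hgt ih =>
    intro h0 hlr hr hP hB
    have hmid1 : left + 1 ≤ mid :=
      (PySem.Int.le_floordiv_iff_mul_le (by omega)).mpr (by omega)
    have hmid2 : mid < right + 1 :=
      (PySem.Int.floordiv_lt_iff_lt_mul (by omega)).mpr (by omega)
    rw [maxLayersLoop]
    simp only [hlt, dite_true]
    rw [if_neg hgt]
    refine ih h0 (by omega) (by omega) hP ?_
    intro m hm hm' hle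
    exact hgt (le_trans (layers_mono (a := mid) (b := m) (by omega) (by omega)) hle)
  | case3 left right hnlt =>
    intro h0 hlr hr hP hB
    rw [maxLayersLoop]
    simp only [hnlt, dite_false]
    refine ⟨h0, by omega, hP, ?_⟩
    by_cases hcap : left = 100000
    · exact Or.inl hcap
    · exact Or.inr (fun hle => hB (left + 1) (by omega) (by omega) (by nlinarith))

theorem bLoop_good (n : Int) : ∀ m : Int,
    0 ≤ m → m ≤ 100000 → (4 * m * (m + 1) ≤ n ∨ m = 0) →
    GoodLayers n (altLoop n m) := by
  intro m
  induction m using altLoop.induct n with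
  | case1 m hcond ih =>
    intro h0 hcap hP
    rw [altLoop]
    simp only [hcond]
    exact ih (by omega) (by omega) (Or.inl (by have := hcond.2; nlinarith [hcond.2]))
  | case2 m hcond =>
    intro h0 hcap hP
    rw [altLoop]
    simp only [hcond, dite_false]
    refine ⟨h0, hcap, hP, ?_⟩
    by_cases hc : m = 100000
    · exact Or.inl hc
    · exact Or.inr (fun hle => hcond ⟨by omega, hle⟩)

-- ===== VERDICT (by name: the statement is the Claim_ definition above) =====
theorem max_layers_spec : Claim_equal_max_layers := by
  intro n _
  unfold Spec_max_layers max_layers max_layers_alt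
  exact goodLayers_unique
    (aLoop_good n 0 100000 (by omega) (by omega) (by omega) (Or.inr rfl) (by intro m h1 h2; omega))
    (bLoop_good n 0 (by omega) (by omega) (Or.inr rfl))
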